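-- pv_equiv track=rewrite | github.com/RohanChimbaikar/Aura | backend/aura-model-v1/aura_v2r_sender.py | text_to_nibble_sequence
-- ===== SOURCE A (Python) =====
-- def safe_ascii_text(text, max_len=None):
--     text = ''.join(chr(ord(c) & 0x7F) for c in text)
--     if max_len is not None:
--         text = text[:max_len]
--     return text
--
-- def char_to_byte(ch):
--     return ord(ch) & 0xFF
--
-- def byte_to_nibbles(byte_val):
--     byte_val = int(byte_val) & 0xFF
--     hi = (byte_val >> 4) & 0x0F
--     lo = byte_val & 0x0F
--     return hi, lo
--
-- def text_to_nibble_sequence(text):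
--     text = safe_ascii_text(text)
--     nibbles = []
--     for ch in text:
--         b = char_to_byte(ch)
--         hi, lo = byte_to_nibbles(b)
--         nibbles.append(hi)
--         nibbles.append(lo)
--     return nibbles
-- ===== SOURCE B (Python) =====
-- def text_to_nibble_sequence(text):
--     s = bytes([ord(c) & 0x7F for c in text]).hex()
--     return [int(h, 16) for h in s]
-- ===== Notes on version B (the rewrite author's own statement) =====
-- stated objective: alternative
-- what changed: Replaces A's per-character helper pipeline (char_to_byte, byte_to_nibbles, append loop) by a two-pass decomposition: build a lowercase hex string from the 0x7F-masked bytes, then map each hex digit to its integer value.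
import Mathlib
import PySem

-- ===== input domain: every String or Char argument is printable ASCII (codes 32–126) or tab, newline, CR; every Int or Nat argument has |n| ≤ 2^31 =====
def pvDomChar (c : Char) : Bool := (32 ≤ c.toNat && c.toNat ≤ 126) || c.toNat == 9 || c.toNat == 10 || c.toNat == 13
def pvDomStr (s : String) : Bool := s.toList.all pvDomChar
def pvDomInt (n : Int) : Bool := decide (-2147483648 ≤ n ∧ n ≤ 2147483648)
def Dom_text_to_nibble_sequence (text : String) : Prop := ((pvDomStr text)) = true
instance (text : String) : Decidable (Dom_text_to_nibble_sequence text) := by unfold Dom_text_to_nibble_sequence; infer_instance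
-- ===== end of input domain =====

-- B replaces A's per-character helper pipeline by one masked-bytes → hex-string pass
-- followed by a second pass over the 2n hex digits (different decomposition; same cost).

-- ===== PORT A =====
def safe_ascii_text (text : String) (maxLen : Option Int) : String :=
  let t := String.ofList (text.toList.map
    (fun c => Char.ofNat (PySem.Int.band (c.toNat : Int) 0x7F).toNat))
  match maxLen with
  | none => t
  | some m => String.ofList (PySem.List.slice t.toList none (some m))

def char_to_byte (ch : Char) : Int := PySem.Int.band (ch.toNat : Int) 0xFF

def byte_to_nibbles (byteVal : Int) : Int × Int :=
  let b := PySem.Int.band byteVal 0xFF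
  let hi := PySem.Int.band (b >>> 4) 0x0F
  let lo := PySem.Int.band b 0x0F
  (hi, lo)

def text_to_nibble_sequence (text : String) : List Int :=
  let t := safe_ascii_text text none
  t.toList.foldl (fun nibbles ch =>
    let b := char_to_byte ch
    let p := byte_to_nibbles b
    (nibbles ++ [p.1]) ++ [p.2]) []

-- ===== PORT B =====
-- hand-ported primitive: the digit characters bytes.hex emits (exact for n < 16, lowercase)
def pvHexDigit (n : Nat) : Char :=
  if n < 10 then Char.ofNat (48 + n) else Char.ofNat (87 + n)

-- hand-ported primitive: int(h, 16) on the lowercase hex digits bytes.hex produces (exact there)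
def pvHexVal (h : Char) : Int :=
  if h.toNat ≤ 57 then (h.toNat : Int) - 48 else (h.toNat : Int) - 87

def text_to_nibble_sequence_alt (text : String) : List Int :=
  -- s = bytes([ord(c) & 0x7F for c in text]).hex()
  let s : List Char := (text.toList.map (fun c => c.toNat &&& 0x7F)).flatMap
    (fun b => [pvHexDigit (b / 16), pvHexDigit (b % 16)])
  -- [int(h, 16) for h in s]
  s.map pvHexVal

-- ===== PRECONDITION & SPEC =====
def Spec_text_to_nibble_sequence (text : String) (out : List Int) : Prop := out = text_to_nibble_sequence_alt text
instance (text : String) (out : List Int) : Decidable (Spec_text_to_nibble_sequence text out) := by unfold Spec_text_to_nibble_sequence; infer_instance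

-- ===== CLAIM (what is proved, stated in full; the proofs are below) =====
def Claim_equal_text_to_nibble_sequence : Prop := ∀ (text : String), Dom_text_to_nibble_sequence text → Spec_text_to_nibble_sequence text (text_to_nibble_sequence text)

-- ===== LEMMAS AND PROOFS =====

-- A's loop, with its accumulator generalized, is a flatMap of the per-character pair
theorem loopA_eq_flatMap (xs : List Char) (acc : List Int) :
    xs.foldl (fun nibbles ch =>
      let b := char_to_byte ch
      let p := byte_to_nibbles b
      (nibbles ++ [p.1]) ++ [p.2]) acc
    = acc ++ xs.flatMap (fun ch =>
        [(byte_to_nibbles (char_to_byte ch)).1, (byte_to_nibbles (char_to_byte ch)).2]) := by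
  induction xs generalizing acc with
  | nil => simp
  | cons c cs ih => rw [List.foldl_cons, ih]; simp

-- per masked code m < 128, A's nibble pair equals B's hex-digit round trip
theorem perchar_eq (m : Nat) (hm : m < 128) :
    [(byte_to_nibbles (char_to_byte (Char.ofNat m))).1,
     (byte_to_nibbles (char_to_byte (Char.ofNat m))).2]
    = [pvHexVal (pvHexDigit (m / 16)), pvHexVal (pvHexDigit (m % 16))] := by
  revert hm
  revert m
  decide

theorem mask_lt (n : Nat) : n &&& 127 < 128 := by
  have := Nat.and_le_right (n := n) (m := 127)
  omega

theorem text_to_nibble_sequence_eq (text : String) :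
    text_to_nibble_sequence text = text_to_nibble_sequence_alt text := by
  unfold text_to_nibble_sequence text_to_nibble_sequence_alt safe_ascii_text
  rw [loopA_eq_flatMap]
  simp only [List.nil_append, String.toList_ofList, List.flatMap_map, List.map_flatMap]
  apply List.flatMap_congr
  intro c _
  have hband : PySem.Int.band (c.toNat : Int) 0x7F = ((c.toNat &&& 127 : Nat) : Int) := by
    exact_mod_cast PySem.Int.band_natCast c.toNat 127
  rw [hband]
  simp only [Int.toNat_natCast]
  exact perchar_eq (c.toNat &&& 127) (mask_lt c.toNat)

-- ===== VERDICT (by name: the statement is the Claim_ definition above) =====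
theorem text_to_nibble_sequence_spec : Claim_equal_text_to_nibble_sequence := by
  intro text _
  exact text_to_nibble_sequence_eq text
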